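-- pv_equiv track=rewrite | github.com/To-phoenix-zhw/MolEM | utils/ordering.py | get_total_mol_ordering
-- ===== SOURCE A (Python) =====
-- def get_total_mol_ordering(file_path):
--     mol_ordering_dict = {}
--     for i in range(len(file_path)):
--         mol_id = file_path[i].split('/')[-3]
--         ordering_id = file_path[i].split('/')[-2]
--         if mol_id in mol_ordering_dict:
--             mol_ordering_dict[mol_id].add(ordering_id)
--         else:
--             mol_ordering_dict[mol_id] = {ordering_id}
--
--     for key, values in mol_ordering_dict.items():
--         l = list(values)
--         l.sort()
--         mol_ordering_dict[key] = l
--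
--     return mol_ordering_dict
-- ===== SOURCE B (Python) =====
-- def _insert_sorted(lst, x):
--     # insert x into sorted duplicate-free lst, keeping it sorted and duplicate-free
--     if not lst:
--         return [x]
--     if lst[0] < x:
--         return [lst[0]] + _insert_sorted(lst[1:], x)
--     if x < lst[0]:
--         return [x] + lst
--     return lst
--
--
-- def get_total_mol_ordering(file_path):
--     result = {}
--     for path in file_path:
--         parts = path.split('/')
--         mol_id = parts[-3]
--         ordering_id = parts[-2]
--         result[mol_id] = _insert_sorted(result.get(mol_id, []), ordering_id)
--     return result
-- ===== Notes on version B (the rewrite author's own statement) =====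
-- stated objective: alternative
-- what changed: Replaces A's two-phase collect-into-sets-then-sort-each with a single pass that keeps each group as a sorted duplicate-free list via an ordered insert, so no second pass over the dict and no final sort.
import Mathlib
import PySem

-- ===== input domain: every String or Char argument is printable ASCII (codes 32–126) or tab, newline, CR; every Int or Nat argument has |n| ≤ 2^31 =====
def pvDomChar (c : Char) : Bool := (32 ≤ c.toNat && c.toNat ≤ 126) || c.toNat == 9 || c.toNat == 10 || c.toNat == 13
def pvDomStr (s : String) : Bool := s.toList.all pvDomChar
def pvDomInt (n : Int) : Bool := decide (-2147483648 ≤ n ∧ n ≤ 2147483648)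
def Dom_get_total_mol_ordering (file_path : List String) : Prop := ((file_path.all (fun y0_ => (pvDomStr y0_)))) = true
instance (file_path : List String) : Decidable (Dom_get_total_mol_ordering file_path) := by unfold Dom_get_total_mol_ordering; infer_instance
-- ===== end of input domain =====

-- B replaces A's collect-into-sets-then-sort-each-group with a single pass that keeps
-- each group as a sorted duplicate-free list via an ordered insert (no second pass, no final sort);
-- equivalence is about the return value (neither program mutates its argument).


-- ===== PORT A =====
-- shared extraction helpers: path.split('/') and its [-3] / [-2] elements, exactly as both
-- Pythons compute them (Pre_ guarantees ≥ 3 parts, so the pyGet? defaults "" are never used)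
def pvParts (p : String) : List String := (PySem.Str.split? p "/").getD []
def pvMolId (p : String) : String := (PySem.List.pyGet? (pvParts p) (-3)).getD ""
def pvOrdId (p : String) : String := (PySem.List.pyGet? (pvParts p) (-2)).getD ""
def pvStepA (d : PySem.Dict String (PySem.Set String)) (p : String) : PySem.Dict String (PySem.Set String) :=
  if d.contains (pvMolId p) then d.modify (pvMolId p) [] (fun s => PySem.Set.add s (pvOrdId p))
  else d.insert (pvMolId p) (PySem.Set.ofList [pvOrdId p])

-- Python's second loop rebinds each existing key in place (`mol_ordering_dict[key] = l`,
-- `l = list(values); l.sort()`); overwriting existing keys keeps their positions, so the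
-- result's items are the first loop's items with each set value sorted into a list
-- (the value type changes set -> list there, which an in-place Lean fold could not express).
def get_total_mol_ordering (file_path : List String) : List (String × List String) :=
  ((PySem.List.pyRange 0 (PySem.List.len file_path)).foldl
      (fun d i => pvStepA d (PySem.List.pyGetD file_path i "")) PySem.Dict.empty).items.map
    (fun kv => (kv.1, PySem.List.sorted kv.2 (fun x => x) false))

-- ===== PORT B =====
-- _insert_sorted from Source B
def pvInsSorted (x : String) : List String → List String
  | [] => [x]
  | y :: ys => if y < x then y :: pvInsSorted x ys else if x < y then x :: y :: ys else y :: ys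

def get_total_mol_ordering_alt (file_path : List String) : List (String × List String) :=
  (file_path.foldl
    (fun d p => d.insert (pvMolId p) (pvInsSorted (pvOrdId p) (d.getD (pvMolId p) [])))
    PySem.Dict.empty).items

-- ===== PRECONDITION & SPEC =====
-- Pre_ excludes exactly the paths with fewer than three '/'-separated parts, on which
-- both Pythons raise IndexError at parts[-3].
def Pre_get_total_mol_ordering (file_path : List String) : Prop :=
  ∀ p ∈ file_path, 3 ≤ (pvParts p).length
instance (file_path : List String) : Decidable (Pre_get_total_mol_ordering file_path) := by
  unfold Pre_get_total_mol_ordering; infer_instance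

def pvWitness_get_total_mol_ordering : List String :=
  ["data/mol1/2/x.sdf", "data/mol1/1/x.sdf", "data/mol2/1/x.sdf", "data/mol1/1/y.sdf"]

def Spec_get_total_mol_ordering (file_path : List String) (out : List (String × List String)) : Prop := out = get_total_mol_ordering_alt file_path
instance (file_path : List String) (out : List (String × List String)) : Decidable (Spec_get_total_mol_ordering file_path out) := by unfold Spec_get_total_mol_ordering; infer_instance

-- ===== CLAIM (what is proved, stated in full; the proofs are below) =====
def Claim_equal_get_total_mol_ordering : Prop := ∀ (file_path : List String), Dom_get_total_mol_ordering file_path → Pre_get_total_mol_ordering file_path → Spec_get_total_mol_ordering file_path (get_total_mol_ordering file_path)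

-- ===== LEMMAS AND PROOFS =====

-- the value translation between A's loop state (a set) and B's loop state (a sorted list)
def pvF (kv : String × List String) : String × List String :=
  (kv.1, PySem.List.sorted kv.2 (fun x => x) false)

lemma pvInsSorted_of_mem (o : String) (m : List String)
    (hs : m.Pairwise (· ≤ ·)) (hm : o ∈ m) : pvInsSorted o m = m := by
  induction m with
  | nil => cases hm
  | cons y ys ih =>
    rw [List.pairwise_cons] at hs
    rcases List.mem_cons.mp hm with h | h
    · subst h
      simp [pvInsSorted]
    · have hyo : y ≤ o := hs.1 o h
      by_cases h1 : y < o
      · simp [pvInsSorted, h1, ih hs.2 h]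
      · have : y = o := le_antisymm hyo (le_of_not_gt h1)
        simp [pvInsSorted, this]

lemma pvInsSorted_perm (o : String) (m : List String) (hm : o ∉ m) :
    (pvInsSorted o m).Perm (o :: m) := by
  induction m with
  | nil => simp [pvInsSorted]
  | cons y ys ih =>
    have hoy : o ≠ y := fun h => hm (by simp [h])
    have hys : o ∉ ys := fun h => hm (List.mem_cons_of_mem _ h)
    by_cases h1 : y < o
    · simpa [pvInsSorted, h1] using ((ih hys).cons y).trans (List.Perm.swap o y ys)
    · have h2 : o < y := lt_of_le_of_ne (le_of_not_gt h1) hoy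
      simp [pvInsSorted, h1, h2]

lemma pvInsSorted_pairwise (o : String) (m : List String)
    (hs : m.Pairwise (· < ·)) (hm : o ∉ m) : (pvInsSorted o m).Pairwise (· < ·) := by
  induction m with
  | nil => simp [pvInsSorted]
  | cons y ys ih =>
    rw [List.pairwise_cons] at hs
    have hoy : o ≠ y := fun h => hm (by simp [h])
    have hys : o ∉ ys := fun h => hm (List.mem_cons_of_mem _ h)
    by_cases h1 : y < o
    · rw [pvInsSorted]
      simp only [h1, if_true]
      rw [List.pairwise_cons]
      refine ⟨fun z hz => ?_, ih hs.2 hys⟩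
      rcases List.mem_cons.mp ((pvInsSorted_perm o ys hys).mem_iff.mp hz) with h | h
      · simpa [h] using h1
      · exact hs.1 z h
    · have h2 : o < y := lt_of_le_of_ne (le_of_not_gt h1) hoy
      rw [pvInsSorted]
      simp only [h1, if_false, h2, if_true]
      exact List.pairwise_cons.mpr ⟨fun z hz => by
        rcases List.mem_cons.mp hz with h | h
        · simpa [h] using h2
        · exact h2.trans (hs.1 z h), List.pairwise_cons.mpr hs⟩

lemma pvSorted_nodup (v : List String) (hn : v.Nodup) :
    (PySem.List.sorted v (fun x => x) false).Pairwise (· < ·) := by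
  have hp := PySem.List.sorted_pairwise v (fun x => x)
  have hnd : (PySem.List.sorted v (fun x => x) false).Nodup :=
    (PySem.List.sorted_perm v (fun x => x) false).nodup_iff.mpr hn
  exact hp.imp₂ (fun a b hle hne => lt_of_le_of_ne hle hne) hnd

lemma pvSorted_add (v : List String) (hn : v.Nodup) (o : String) :
    PySem.List.sorted (PySem.Set.add v o) (fun x => x) false
      = pvInsSorted o (PySem.List.sorted v (fun x => x) false) := by
  by_cases h : o ∈ v
  · rw [PySem.Set.add_of_mem h,
      pvInsSorted_of_mem o _ (PySem.List.sorted_pairwise v (fun x => x))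
        ((PySem.List.mem_sorted _ _ _ _).mpr h)]
  · rw [PySem.Set.add_of_not_mem h]
    have hso : o ∉ PySem.List.sorted v (fun x => x) false := by
      rw [PySem.List.mem_sorted]; exact h
    refine PySem.List.sorted_eq_of_perm_of_pairwise_lt _ _ _
      ?_ (pvInsSorted_pairwise o _ (pvSorted_nodup v hn) hso)
    exact ((pvInsSorted_perm o _ hso).trans
      ((PySem.List.sorted_perm v (fun x => x) false).cons o)).trans
      (List.perm_append_singleton o v).symm

lemma pvCore (dA : PySem.Dict String (PySem.Set String)) (dB : PySem.Dict String (List String))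
    (m o : String) (hnd : ∀ kv ∈ dA.items, kv.2.Nodup) (hB : dB.items = dA.items.map pvF) :
    (dB.insert m (pvInsSorted o (dB.getD m []))).items
      = (if dA.contains m then dA.modify m [] (fun s => PySem.Set.add s o)
         else dA.insert m (PySem.Set.ofList [o])).items.map pvF := by
  have hcont : dB.contains m = dA.contains m := by
    simp [PySem.Dict.contains, hB, List.any_map, Function.comp_def, pvF]
  have hget : dB.get? m = (dA.get? m).map (fun v => PySem.List.sorted v (fun x => x) false) := by
    simp [PySem.Dict.get?, hB, List.find?_map, Function.comp_def, pvF, Option.map_map]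
  by_cases hc : dA.contains m = true
  · have hany : dA.items.any (fun q => q.1 == m) = true := hc
    obtain ⟨kv0, hfind⟩ := Option.isSome_iff_exists.mp
      (List.find?_isSome.mpr (List.any_eq_true.mp hany))
    have hnd0 : kv0.2.Nodup := hnd kv0 (List.mem_of_find?_eq_some hfind)
    have hgetA : dA.getD m [] = kv0.2 := by
      simp only [PySem.Dict.getD, PySem.Dict.get?]
      rw [hfind]; rfl
    have hgetB : dB.getD m [] = PySem.List.sorted kv0.2 (fun x => x) false := by
      simp only [PySem.Dict.getD]
      rw [hget]
      simp only [PySem.Dict.get?]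
      rw [hfind]; rfl
    have hcB : dB.contains m = true := hcont.trans hc
    rw [if_pos hc]
    simp only [PySem.Dict.modify, PySem.Dict.insert, hcB, hc, if_true, hB, List.map_map]
    refine List.map_congr_left (fun kv hkv => ?_)
    by_cases hk : kv.1 = m
    · simp [pvF, hk, hgetA, hgetB, pvSorted_add kv0.2 hnd0 o]
    · simp [pvF, hk]
  · have hgetAnone : dA.get? m = none := by
      simp only [PySem.Dict.get?, Option.map_eq_none_iff, List.find?_eq_none]
      intro q hq
      by_contra h
      exact hc (List.any_eq_true.mpr ⟨q, hq, by simpa using h⟩)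
    have hgetB : dB.getD m [] = [] := by
      simp only [PySem.Dict.getD]; rw [hget]; simp [hgetAnone]
    have hcB : ¬ dB.contains m = true := fun h => hc (hcont.symm.trans h)
    rw [if_neg hc]
    simp only [PySem.Dict.insert, hcB, hc, hB]
    simp [pvF, hgetB, pvInsSorted, PySem.Set.ofList,
      PySem.List.sorted_eq_self_of_pairwise [o] (fun x => x) (by simp)]

lemma pvStep_items (dA : PySem.Dict String (PySem.Set String)) (dB : PySem.Dict String (List String))
    (p : String) (hnd : ∀ kv ∈ dA.items, kv.2.Nodup) (hB : dB.items = dA.items.map pvF) :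
    (dB.insert (pvMolId p) (pvInsSorted (pvOrdId p) (dB.getD (pvMolId p) []))).items
      = (pvStepA dA p).items.map pvF := by
  simp only [pvStepA]
  exact pvCore dA dB (pvMolId p) (pvOrdId p) hnd hB

lemma pvStep_nodup (dA : PySem.Dict String (PySem.Set String)) (p : String)
    (hnd : ∀ kv ∈ dA.items, kv.2.Nodup) :
    ∀ kv ∈ (pvStepA dA p).items, kv.2.Nodup := by
  intro kv hkv
  by_cases hc : dA.contains (pvMolId p) = true
  · have hgd : (dA.getD (pvMolId p) []).Nodup := by
      have hany : dA.items.any (fun q => q.1 == pvMolId p) = true := hc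
      obtain ⟨kv0, hfind⟩ := Option.isSome_iff_exists.mp
        (List.find?_isSome.mpr (List.any_eq_true.mp hany))
      have heq : dA.getD (pvMolId p) [] = kv0.2 := by
        simp only [PySem.Dict.getD, PySem.Dict.get?]
        rw [hfind]; rfl
      rw [heq]; exact hnd kv0 (List.mem_of_find?_eq_some hfind)
    simp only [pvStepA, hc, if_true, PySem.Dict.modify, PySem.Dict.insert] at hkv
    rcases List.mem_map.mp hkv with ⟨q, hq, hqe⟩
    by_cases hk : q.1 == pvMolId p
    · rw [if_pos hk] at hqe
      subst hqe
      exact PySem.Set.nodup_add _ _ hgd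
    · rw [if_neg (by simpa using hk)] at hqe; subst hqe; exact hnd q hq
  · have hc' : dA.contains (pvMolId p) = false := by simpa using hc
    simp only [pvStepA, hc', Bool.false_eq_true, if_false, PySem.Dict.insert] at hkv
    rcases List.mem_append.mp hkv with h | h
    · exact hnd kv h
    · simp at h; subst h; simp [PySem.Set.ofList]

lemma pvMain (fp : List String) :
    ∀ (dA : PySem.Dict String (PySem.Set String)) (dB : PySem.Dict String (List String)),
    (∀ kv ∈ dA.items, kv.2.Nodup) →
    dB.items = dA.items.map pvF →
    (fp.foldl (fun d p => d.insert (pvMolId p) (pvInsSorted (pvOrdId p) (d.getD (pvMolId p) []))) dB).items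
      = ((fp.foldl pvStepA dA).items).map pvF := by
  induction fp with
  | nil => intro dA dB hnd hB; simpa using hB
  | cons p rest ih =>
    intro dA dB hnd hB
    simp only [List.foldl_cons]
    exact ih (pvStepA dA p) _ (pvStep_nodup dA p hnd) (pvStep_items dA dB p hnd hB)

-- ===== VERDICT (by name: the statement is the Claim_ definition above) =====
theorem get_total_mol_ordering_spec : Claim_equal_get_total_mol_ordering := by
  intro fp _ _
  unfold Spec_get_total_mol_ordering get_total_mol_ordering get_total_mol_ordering_alt
  rw [PySem.List.foldl_pyRange_pyGetD fp "" pvStepA PySem.Dict.empty (le_refl 0)]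
  simp only [Int.toNat_zero, List.drop_zero]
  exact (pvMain fp PySem.Dict.empty PySem.Dict.empty (by simp [PySem.Dict.empty]) (by simp [PySem.Dict.empty])).symm
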